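-- pv_equiv track=rewrite | github.com/swstkm/hgt_inference_comparative_study | 03-analyse_outputs/lib/function_analyses.py | get_meta_category
-- ===== SOURCE A (Python) =====
-- def get_meta_category(go_ids_list, meta_category_to_terms_dict):
--     meta_categories_list = [
--         meta_category
--         for go_id in go_ids_list
--         for meta_category, terms in meta_category_to_terms_dict.items()
--         if go_id in terms
--     ]
--     return meta_categories_list
-- ===== SOURCE B (Python) =====
-- def get_meta_category(go_ids_list, meta_category_to_terms_dict):
--     # Inverted index: term -> meta categories (in dict order) whose term set contains it.
--     index = {}
--     for meta_category, terms in meta_category_to_terms_dict.items():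
--         for term in set(terms):
--             index.setdefault(term, []).append(meta_category)
--     return [m for go_id in go_ids_list for m in index.get(go_id, [])]
-- ===== Notes on version B (the rewrite author's own statement) =====
-- stated objective: faster
-- what changed: B precomputes an inverted index term->meta_categories once, then each go_id is a single dict lookup, instead of A's scan of every (meta_category, terms) list for every go_id.
import Mathlib
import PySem

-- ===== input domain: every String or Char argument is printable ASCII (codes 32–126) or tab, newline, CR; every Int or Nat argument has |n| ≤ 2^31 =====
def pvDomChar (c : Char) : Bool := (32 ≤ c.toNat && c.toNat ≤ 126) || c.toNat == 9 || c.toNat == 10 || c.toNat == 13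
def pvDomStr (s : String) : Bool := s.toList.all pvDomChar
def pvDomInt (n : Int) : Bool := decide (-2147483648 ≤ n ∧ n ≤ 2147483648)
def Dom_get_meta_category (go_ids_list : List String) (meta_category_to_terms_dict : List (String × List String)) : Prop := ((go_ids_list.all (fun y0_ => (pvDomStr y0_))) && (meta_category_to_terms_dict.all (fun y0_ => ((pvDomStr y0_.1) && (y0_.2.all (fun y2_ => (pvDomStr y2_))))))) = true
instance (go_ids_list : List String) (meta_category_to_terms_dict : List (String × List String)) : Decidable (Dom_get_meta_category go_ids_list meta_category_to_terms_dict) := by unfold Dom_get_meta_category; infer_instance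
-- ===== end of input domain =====

-- B replaces A's per-go_id scan of the whole dict by a precomputed inverted index term -> meta categories (faster: one dict lookup per go_id).

-- ===== PORT A =====
-- list comprehension: for go_id in go_ids_list: for (meta_category, terms) in dict.items(): if go_id in terms: append meta_category
def get_meta_category (go_ids_list : List String) (meta_category_to_terms_dict : List (String × List String)) : List String :=
  go_ids_list.foldl (fun acc go_id =>
    meta_category_to_terms_dict.foldl (fun acc2 p =>
      if go_id ∈ p.2 then acc2 ++ [p.1] else acc2) acc) []

-- ===== PORT B =====
-- build index: for (meta_category, terms) in dict.items(): for term in set(terms): index.setdefault(term, []).append(meta_category)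
def get_meta_category_alt (go_ids_list : List String) (meta_category_to_terms_dict : List (String × List String)) : List String :=
  let index : PySem.Dict String (List String) :=
    meta_category_to_terms_dict.foldl (fun idx p =>
      (PySem.Set.ofList p.2).foldl (fun idx2 term =>
        idx2.insert term (idx2.getD term [] ++ [p.1])) idx)
      (PySem.Dict.empty : PySem.Dict String (List String))
  go_ids_list.foldl (fun acc go_id => acc ++ index.getD go_id []) []

-- ===== PRECONDITION & SPEC =====
def Spec_get_meta_category (go_ids_list : List String) (meta_category_to_terms_dict : List (String × List String)) (out : List String) : Prop := out = get_meta_category_alt go_ids_list meta_category_to_terms_dict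
instance (go_ids_list : List String) (meta_category_to_terms_dict : List (String × List String)) (out : List String) : Decidable (Spec_get_meta_category go_ids_list meta_category_to_terms_dict out) := by unfold Spec_get_meta_category; infer_instance

-- ===== CLAIM (what is proved, stated in full; the proofs are below) =====
def Claim_equal_get_meta_category : Prop := ∀ (go_ids_list : List String) (meta_category_to_terms_dict : List (String × List String)), Dom_get_meta_category go_ids_list meta_category_to_terms_dict → Spec_get_meta_category go_ids_list meta_category_to_terms_dict (get_meta_category go_ids_list meta_category_to_terms_dict)

-- ===== LEMMAS AND PROOFS =====

-- Folding one entry's (deduplicated) term set into the index appends m to key g exactly when g is a member.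
theorem pv_getD_fold_terms (g m : String) (s : List String) (hnd : s.Nodup)
    (idx : PySem.Dict String (List String)) :
    (s.foldl (fun idx2 t => idx2.insert t (idx2.getD t [] ++ [m])) idx).getD g []
      = if g ∈ s then idx.getD g [] ++ [m] else idx.getD g [] := by
  induction s generalizing idx with
  | nil => simp
  | cons t s' ih =>
    rcases List.nodup_cons.mp hnd with ⟨htn, hnd'⟩
    rw [List.foldl_cons, ih hnd']
    by_cases hg : g = t
    · subst hg
      have : g ∉ s' := htn
      simp [this]
    · simp [PySem.Dict.getD_insert, hg, List.mem_cons]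

-- The whole index, read at key g, equals A's inner scan of the dict for g.
theorem pv_getD_index (g : String) (d : List (String × List String))
    (idx : PySem.Dict String (List String)) :
    (d.foldl (fun idx p =>
        (PySem.Set.ofList p.2).foldl (fun idx2 t => idx2.insert t (idx2.getD t [] ++ [p.1])) idx) idx).getD g []
      = d.foldl (fun acc p => if g ∈ p.2 then acc ++ [p.1] else acc) (idx.getD g []) := by
  induction d generalizing idx with
  | nil => rfl
  | cons p d' ih =>
    rw [List.foldl_cons, List.foldl_cons, ih]
    congr 1
    rw [pv_getD_fold_terms g p.1 _ (PySem.Set.nodup_ofList p.2)]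
    simp [PySem.Set.mem_ofList]

-- A's inner scan factors its accumulator out front.
theorem pv_inner_factor (g : String) (d : List (String × List String)) (acc : List String) :
    d.foldl (fun acc2 p => if g ∈ p.2 then acc2 ++ [p.1] else acc2) acc
      = acc ++ d.foldl (fun acc2 p => if g ∈ p.2 then acc2 ++ [p.1] else acc2) [] := by
  induction d generalizing acc with
  | nil => simp
  | cons p d' ih =>
    rw [List.foldl_cons, List.foldl_cons]
    by_cases h : g ∈ p.2
    · rw [if_pos h, if_pos h, List.nil_append, ih (acc ++ [p.1]), ih [p.1], List.append_assoc]
    · rw [if_neg h, if_neg h]; exact ih acc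

-- The two outer loops agree (no precondition needed).
theorem pv_main_eq (go : List String) (d : List (String × List String)) :
    go.foldl (fun acc go_id =>
        d.foldl (fun acc2 p => if go_id ∈ p.2 then acc2 ++ [p.1] else acc2) acc) []
      = go.foldl (fun acc go_id =>
          acc ++ (d.foldl (fun idx p =>
            (PySem.Set.ofList p.2).foldl (fun idx2 t => idx2.insert t (idx2.getD t [] ++ [p.1])) idx)
            (PySem.Dict.empty : PySem.Dict String (List String))).getD go_id []) [] := by
  induction go using List.reverseRecOn with
  | nil => rfl
  | append_singleton gs g ih =>
    rw [List.foldl_append, List.foldl_append, ← ih, List.foldl_cons, List.foldl_nil,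
      List.foldl_cons, List.foldl_nil, pv_getD_index, pv_inner_factor]
    simp [PySem.Dict.getD, PySem.Dict.get?, PySem.Dict.empty]

-- ===== VERDICT (by name: the statement is the Claim_ definition above) =====
theorem get_meta_category_spec : Claim_equal_get_meta_category := by
  intro go d _
  exact pv_main_eq go d
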